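-- pv_equiv track=rewrite | github.com/StatBiomed/clonaltrans | clonaltrans/pl/gillespie_tree.py | get_divisions
-- ===== SOURCE A (Python) =====
-- from collections import Counter, defaultdict
--
-- def get_divisions(target_path, cluster_names):
--     target_path_names = [get_cell_idx(i, types='name', cluster_names=cluster_names) for i in target_path]
--
--     dict_counter = Counter(target_path_names)
--     num_div = 0
--
--     for cluster in dict_counter.keys():
--         if cluster != target_path_names[-1]:
--             num_div = num_div + dict_counter[cluster] - 1
--
--     return num_div, target_path_names[-1]
--
-- def get_cell_idx(node, types='index', cluster_names=None):
--     length = 5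
--
--     for idx, item in enumerate(cluster_names):
--         if item == node[:len(item)]:
--             length = len(cluster_names[idx])
--             break
--
--     if types == 'index':
--         return int(node[length:])
--     if types == 'name':
--         return node[:length]
-- ===== SOURCE B (Python) =====
-- def get_divisions(target_path, cluster_names):
--     def cluster_of(node):
--         for item in cluster_names:
--             if node.startswith(item):
--                 return node[:len(item)]
--         return node[:5]
--
--     names = [cluster_of(n) for n in target_path]
--     last = names[-1]
--     seen = set()
--     num_div = 0
--     for nm in names:
--         if nm in seen and nm != last:
--             num_div += 1
--         seen.add(nm)
--     return num_div, last
-- ===== Notes on version B (the rewrite author's own statement) =====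
-- stated objective: simpler
-- what changed: Replaces the Counter-then-filtered-sum over distinct clusters by a single left-to-right pass with a seen-set that counts repeat occurrences of non-last clusters directly; Pre_ excludes the empty path, on which A raises IndexError at target_path_names[-1] (B raises there too).
import Mathlib
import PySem

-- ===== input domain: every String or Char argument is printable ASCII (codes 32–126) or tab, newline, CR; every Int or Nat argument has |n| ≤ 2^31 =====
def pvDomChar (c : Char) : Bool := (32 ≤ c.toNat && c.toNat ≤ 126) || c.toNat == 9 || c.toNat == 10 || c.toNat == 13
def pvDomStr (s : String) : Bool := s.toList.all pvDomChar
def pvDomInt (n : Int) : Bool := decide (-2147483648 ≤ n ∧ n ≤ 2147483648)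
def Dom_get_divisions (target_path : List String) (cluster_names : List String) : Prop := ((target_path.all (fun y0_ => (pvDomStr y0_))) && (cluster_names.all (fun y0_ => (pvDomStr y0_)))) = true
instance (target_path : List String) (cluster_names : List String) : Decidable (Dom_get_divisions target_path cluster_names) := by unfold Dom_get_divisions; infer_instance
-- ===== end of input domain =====

-- B replaces A's Counter + filtered sum over the distinct clusters by one pass with a seen-set
-- counting repeat occurrences directly (objective: simpler, same cost).

-- ===== PORT A =====
-- get_cell_idx(node, types='name', cluster_names): the length-search loop; node[:k] with k ≥ 0 is take k (exact).
def pvLenA (node : List Char) : List String → Nat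
  | [] => 5
  | item :: rest =>
      if item.toList = node.take item.toList.length then item.toList.length
      else pvLenA node rest

def get_divisions (target_path : List String) (cluster_names : List String) : Int × String :=
  let names := target_path.map (fun i => String.mk (i.toList.take (pvLenA i.toList cluster_names)))
  let dct := PySem.Dict.counter names
  -- names[-1]; Pre_ excludes the empty path, on which Python raises IndexError
  let last := (PySem.List.pyGet? names (-1)).getD ""
  let numDiv := dct.keys.foldl
      (fun nd cluster => if cluster ≠ last then nd + dct.getD cluster 0 - 1 else nd) 0
  (numDiv, last)

-- ===== PORT B =====
def pvClusterOf (node : String) : List String → String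
  | [] => String.mk (node.toList.take 5)
  | item :: rest =>
      if PySem.Str.startswith node item then String.mk (node.toList.take item.toList.length)
      else pvClusterOf node rest

def get_divisions_alt (target_path : List String) (cluster_names : List String) : Int × String :=
  let names := target_path.map (fun n => pvClusterOf n cluster_names)
  -- names[-1]; B raises IndexError on the empty path too
  let last := (PySem.List.pyGet? names (-1)).getD ""
  let r := names.foldl
      (fun (p : PySem.Set String × Int) nm =>
        (PySem.Set.add p.1 nm, if p.1.contains nm && nm != last then p.2 + 1 else p.2))
      (PySem.Set.empty, 0)
  (r.2, last)

-- ===== PRECONDITION & SPEC =====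
-- Pre_ excludes only the empty path, where both Pythons raise IndexError at names[-1].
def Pre_get_divisions (target_path : List String) (cluster_names : List String) : Prop :=
  target_path ≠ []
instance (target_path : List String) (cluster_names : List String) : Decidable (Pre_get_divisions target_path cluster_names) := by unfold Pre_get_divisions; infer_instance

def pvWitness_get_divisions : List String × List String := (["A1", "A2", "B1"], ["A", "B"])

def Spec_get_divisions (target_path : List String) (cluster_names : List String) (out : Int × String) : Prop := out = get_divisions_alt target_path cluster_names
instance (target_path : List String) (cluster_names : List String) (out : Int × String) : Decidable (Spec_get_divisions target_path cluster_names out) := by unfold Spec_get_divisions; infer_instance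

-- ===== CLAIM (what is proved, stated in full; the proofs are below) =====
def Claim_equal_get_divisions : Prop := ∀ (target_path : List String) (cluster_names : List String), Dom_get_divisions target_path cluster_names → Pre_get_divisions target_path cluster_names → Spec_get_divisions target_path cluster_names (get_divisions target_path cluster_names)

-- ===== LEMMAS AND PROOFS =====

-- the two name extractors agree
theorem pvName_eq (node : String) (cn : List String) :
    String.mk (node.toList.take (pvLenA node.toList cn)) = pvClusterOf node cn := by
  induction cn with
  | nil => rfl
  | cons item rest ih =>
      have hiff : (item.toList = node.toList.take item.toList.length)
          ↔ PySem.Chars.startswith node.toList item.toList = true := by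
        rw [PySem.Chars.startswith_iff]
        exact (List.prefix_iff_eq_take).symm
      by_cases h : item.toList = node.toList.take item.toList.length
      · simp only [pvLenA, pvClusterOf, PySem.Str.startswith_eq]
        rw [if_pos h, if_pos (hiff.mp h)]
      · simp only [pvLenA, pvClusterOf, PySem.Str.startswith_eq]
        rw [if_neg h, if_neg (fun hc => h (hiff.mpr hc))]
        exact ih

-- A's fold over the distinct clusters, as a sum
theorem pvA_as_sum (last : String) (ns : List String) :
    (PySem.Set.ofList ns).foldl
        (fun nd c => if c ≠ last then nd + (ns.count c : Int) - 1 else nd) 0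
      = ((PySem.Set.ofList ns).map
          (fun c => if c ≠ last then (ns.count c : Int) - 1 else 0)).sum := by
  have h1 : (fun (nd : Int) (c : String) => if c ≠ last then nd + (ns.count c : Int) - 1 else nd)
      = (fun nd c => nd + (if c ≠ last then (ns.count c : Int) - 1 else 0)) := by
    funext nd c; split <;> ring
  rw [h1, PySem.List.foldl_add, zero_add]

-- the first component of B's loop is the seen-set of the processed prefix
theorem pvB_fst (last : String) (ns : List String) (s : PySem.Set String) (nd : Int) :
    (ns.foldl
      (fun (p : PySem.Set String × Int) nm =>
        (PySem.Set.add p.1 nm, if p.1.contains nm && nm != last then p.2 + 1 else p.2))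
      (s, nd)).1 = ns.foldl PySem.Set.add s := by
  induction ns generalizing s nd with
  | nil => rfl
  | cons x xs ih => simpa using ih _ _

-- the counting equivalence: A's per-distinct-cluster (count - 1) sum = B's repeat count
theorem pvCount_eq (last : String) (ns : List String) :
    ((PySem.Set.ofList ns).map
        (fun c => if c ≠ last then (ns.count c : Int) - 1 else 0)).sum
      = (ns.foldl
          (fun (p : PySem.Set String × Int) nm =>
            (PySem.Set.add p.1 nm, if p.1.contains nm && nm != last then p.2 + 1 else p.2))
          (PySem.Set.empty, 0)).2 := by
  induction ns using List.reverseRecOn with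
  | nil => rfl
  | append_singleton ns x ih =>
      rw [List.foldl_append]
      simp only [List.foldl_cons, List.foldl_nil]
      rw [pvB_fst]
      have hfst : ns.foldl PySem.Set.add PySem.Set.empty = PySem.Set.ofList ns := by
        rw [PySem.Set.ofList_eq_foldl]; rfl
      rw [hfst, ← ih, PySem.Set.ofList_append_singleton]
      have hcnt : ∀ c : String, ((ns ++ [x]).count c : Int)
          = (ns.count c : Int) + (if c = x then 1 else 0) := by
        intro c
        rw [List.count_append]
        by_cases h : c = x
        · subst h; simp
        · simp [List.count_singleton, h, (by simpa using Ne.symm h : (x == c) = false)]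
      by_cases hx : x ∈ ns
      · -- seen before: the set is unchanged; x's count grows by one
        rw [PySem.Set.add_of_mem ((PySem.Set.mem_ofList ns x).mpr hx)]
        have hmap : (PySem.Set.ofList ns).map
              (fun c => if c ≠ last then ((ns ++ [x]).count c : Int) - 1 else 0)
            = (PySem.Set.ofList ns).map
              (fun c => (if c ≠ last then (ns.count c : Int) - 1 else 0)
                + (if c = x ∧ c ≠ last then 1 else 0)) := by
          apply List.map_congr_left
          intro c _
          rw [hcnt c]
          by_cases h2 : c = x
          · subst h2
            by_cases h1 : c = last
            · simp [h1]
            · simp only [h1, ne_eq, not_false_eq_true, if_pos, and_self, if_true]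
              ring
          · simp [h2]
        rw [hmap, PySem.List.sum_map_add_int]
        have hone : ((PySem.Set.ofList ns).map
              (fun c => if c = x ∧ c ≠ last then (1 : Int) else 0)).sum
            = if x ≠ last then 1 else 0 := by
          by_cases hl : x = last
          · have hz : ∀ c ∈ PySem.Set.ofList ns,
                (if c = x ∧ c ≠ last then (1 : Int) else 0) = (fun _ => (0 : Int)) c := by
              intro c _
              rw [if_neg]
              rintro ⟨h1, h2⟩
              exact h2 (h1 ▸ hl)
            rw [List.map_congr_left hz]
            simp [hl]
          · have hp : (fun c => if c = x ∧ c ≠ last then (1 : Int) else 0)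
                = (fun c => if (c == x) = true then (1 : Int) else 0) := by
              funext c
              by_cases h2 : c = x
              · subst h2; simp [hl]
              · simp [h2]
            rw [hp, PySem.List.sum_map_ite_one_zero]
            have : (PySem.Set.ofList ns).countP (fun c => c == x) = (PySem.Set.ofList ns).count x := by
              rw [List.count_eq_countP]
            rw [this, List.count_eq_one_of_mem (PySem.Set.nodup_ofList ns)
              ((PySem.Set.mem_ofList ns x).mpr hx)]
            simp [hl]
        rw [hone]
        have hseen : PySem.Set.contains (PySem.Set.ofList ns) x = true :=
          (PySem.Set.contains_iff _ _).mpr ((PySem.Set.mem_ofList ns x).mpr hx)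
        by_cases hl : x = last
        · simp [hseen, hl]
        · have hb : (x != last) = true := by simp [hl]
          simp only [hseen, hb, Bool.and_self, if_pos]
          rw [if_pos hl]
      · -- first occurrence: a fresh key with count 1 contributes 0
        rw [PySem.Set.add_of_not_mem (fun h => hx ((PySem.Set.mem_ofList ns x).mp h))]
        rw [List.map_append, List.sum_append]
        have hmap : (PySem.Set.ofList ns).map
              (fun c => if c ≠ last then ((ns ++ [x]).count c : Int) - 1 else 0)
            = (PySem.Set.ofList ns).map
              (fun c => if c ≠ last then (ns.count c : Int) - 1 else 0) := by
          apply List.map_congr_left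
          intro c hc
          have hcx : c ≠ x := fun h => hx (h ▸ (PySem.Set.mem_ofList ns c).mp hc)
          rw [hcnt c]
          simp [hcx]
        rw [hmap]
        have hx0 : ns.count x = 0 := List.count_eq_zero.mpr hx
        have hseen : PySem.Set.contains (PySem.Set.ofList ns) x = false := by
          rw [Bool.eq_false_iff]
          intro h
          exact hx ((PySem.Set.mem_ofList ns x).mp ((PySem.Set.contains_iff _ _).mp h))
        have hnew : (if x ≠ last then (((ns ++ [x]).count x : Int)) - 1 else 0) = 0 := by
          rw [hcnt x]
          by_cases hl : x = last <;> simp [hl, hx0]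
        simp only [List.map_cons, List.map_nil, List.sum_cons, List.sum_nil, hnew, add_zero,
          hseen, Bool.false_and]
        simp

-- ===== VERDICT (by name: the statement is the Claim_ definition above) =====
theorem get_divisions_spec : Claim_equal_get_divisions := by
  intro target_path cluster_names _ _
  unfold Spec_get_divisions get_divisions get_divisions_alt
  have hnames : target_path.map (fun i => String.mk (i.toList.take (pvLenA i.toList cluster_names)))
      = target_path.map (fun n => pvClusterOf n cluster_names) :=
    List.map_congr_left (fun n _ => pvName_eq n cluster_names)
  rw [hnames]
  set names := target_path.map (fun n => pvClusterOf n cluster_names) with hn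
  set last := (PySem.List.pyGet? names (-1)).getD "" with hl
  refine Prod.ext ?_ rfl
  show (PySem.Dict.counter names).keys.foldl
      (fun nd cluster => if cluster ≠ last then nd + (PySem.Dict.counter names).getD cluster 0 - 1 else nd) 0
    = _
  have hfold : (PySem.Dict.counter names).keys.foldl
      (fun nd cluster => if cluster ≠ last then nd + (PySem.Dict.counter names).getD cluster 0 - 1 else nd) 0
      = (PySem.Set.ofList names).foldl
          (fun nd c => if c ≠ last then nd + (names.count c : Int) - 1 else nd) 0 := by
    rw [PySem.Dict.keys_counter]
    apply List.foldl_ext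
    intro a c _
    rw [PySem.Dict.getD_counter]
  rw [hfold, pvA_as_sum, pvCount_eq]
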